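-- pv_equiv track=rewrite | github.com/PierreEtienneJ/SwarmZ | Simulator/swarmz_simulator/environment.py | regName
-- ===== SOURCE A (Python) =====
-- def regName(string):
--     j=len(string)-1
--     while j>0:
--         if(string[j]=='_'):
--             break
--         j-=1
--     if(j==0):
--         return string
--     return string[:j]
-- ===== SOURCE B (Python) =====
-- def regName(string):
--     last = 0
--     for i, c in enumerate(string):
--         if c == '_':
--             last = i
--     return string[:last] if last > 0 else string
-- ===== Notes on version B (the rewrite author's own statement) =====
-- stated objective: alternative
-- what changed: Replaces the backward while-loop that breaks at the first underscore from the right with a single forward pass that maintains the last-seen underscore index over the whole string.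
import Mathlib
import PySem

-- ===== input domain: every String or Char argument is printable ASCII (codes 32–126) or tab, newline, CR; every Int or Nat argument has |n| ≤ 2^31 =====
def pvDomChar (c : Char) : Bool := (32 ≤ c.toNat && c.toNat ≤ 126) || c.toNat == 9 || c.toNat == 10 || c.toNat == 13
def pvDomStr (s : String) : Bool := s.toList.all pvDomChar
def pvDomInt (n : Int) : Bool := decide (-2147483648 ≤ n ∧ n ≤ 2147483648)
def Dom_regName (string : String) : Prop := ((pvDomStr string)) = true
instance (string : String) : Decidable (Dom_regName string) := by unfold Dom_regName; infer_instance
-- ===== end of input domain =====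

-- B replaces A's backward scan that breaks at the first underscore from the right by a
-- single forward pass maintaining the last-seen underscore index (alternative decomposition).

-- ===== PORT A =====
-- 'j = len(string)-1; while j > 0: if string[j] == '_': break; j -= 1'
def regNameLoop (cs : List Char) (j : Int) : Int :=
  if 0 < j then
    if PySem.List.pyGet? cs j = some '_' then j else regNameLoop cs (j - 1)
  else j
termination_by j.toNat
decreasing_by omega

def regName (string : String) : String :=
  let cs := string.toList
  let j := regNameLoop cs ((cs.length : Int) - 1)
  if j = 0 then string
  else String.ofList (PySem.List.slice cs none (some j))   -- string[:j]

-- ===== PORT B =====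
-- 'last = 0; for i, c in enumerate(string): if c == '_': last = i; return string[:last] if last > 0 else string'
def regName_alt (string : String) : String :=
  let cs := string.toList
  let last := (PySem.List.enumerate cs).foldl
    (fun acc ic => if ic.2 = '_' then ic.1 else acc) 0
  if 0 < last then String.ofList (PySem.List.slice cs none (some last)) else string

-- ===== PRECONDITION & SPEC =====
def Spec_regName (string : String) (out : String) : Prop := out = regName_alt string
instance (string : String) (out : String) : Decidable (Spec_regName string out) := by unfold Spec_regName; infer_instance

-- ===== CLAIM (what is proved, stated in full; the proofs are below) =====
def Claim_equal_regName : Prop := ∀ (string : String), Dom_regName string → Spec_regName string (regName string)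

-- ===== LEMMAS AND PROOFS =====

theorem enumerate_append_singleton (xs : List Char) (x : Char) (s : Int) :
    PySem.List.enumerate (xs ++ [x]) s
      = PySem.List.enumerate xs s ++ [((s + xs.length : Int), x)] := by
  induction xs generalizing s with
  | nil => simp [PySem.List.enumerate_cons, PySem.List.enumerate_nil]
  | cons y ys ih => simp [PySem.List.enumerate_cons, ih]; ring_nf

theorem regNameLoop_nonneg (cs : List Char) (j : Int) (h : 0 ≤ j) :
    0 ≤ regNameLoop cs j := by
  fun_induction regNameLoop cs j with
  | case1 j hj hu => omega
  | case2 j hj hu ih => exact ih (by omega)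
  | case3 j hj => omega

theorem regNameLoop_append (xs : List Char) (x : Char) (j : Int)
    (hj : j < (xs.length : Int)) : regNameLoop (xs ++ [x]) j = regNameLoop xs j := by
  fun_induction regNameLoop xs j with
  | case1 j hj' hu =>
    have hget : PySem.List.pyGet? (xs ++ [x]) j = PySem.List.pyGet? xs j := by
      rw [show j = ((j.toNat : Nat) : Int) by omega, PySem.List.pyGet?_natCast,
        PySem.List.pyGet?_natCast, List.getElem?_append_left (by omega)]
    conv_lhs => rw [regNameLoop]
    rw [if_pos hj', hget, if_pos hu]
  | case2 j hj' hu ih =>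
    have hget : PySem.List.pyGet? (xs ++ [x]) j = PySem.List.pyGet? xs j := by
      rw [show j = ((j.toNat : Nat) : Int) by omega, PySem.List.pyGet?_natCast,
        PySem.List.pyGet?_natCast, List.getElem?_append_left (by omega)]
    conv_lhs => rw [regNameLoop]
    rw [if_pos hj', hget, if_neg hu]
    exact ih (by omega)
  | case3 j hj' =>
    conv_lhs => rw [regNameLoop]
    rw [if_neg hj']

theorem regNameLoop_eq_fold (cs : List Char) (h : cs ≠ []) :
    regNameLoop cs ((cs.length : Int) - 1)
      = (PySem.List.enumerate cs).foldl (fun acc ic => if ic.2 = '_' then ic.1 else acc) 0 := by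
  induction cs using List.reverseRecOn with
  | nil => exact absurd rfl h
  | append_singleton xs x ih =>
    rw [enumerate_append_singleton, List.foldl_append]
    rcases eq_or_ne xs [] with hx | hx
    · subst hx
      rw [regNameLoop]
      simp [PySem.List.enumerate_nil]
    · have hlen : 0 < xs.length := List.length_pos_iff.mpr hx
      have hlen' : (0 : Int) < (xs.length : Int) := by exact_mod_cast hlen
      have hL : ((xs ++ [x]).length : Int) - 1 = (xs.length : Int) := by
        simp
      have hget : PySem.List.pyGet? (xs ++ [x]) (xs.length : Int) = some x := by
        rw [PySem.List.pyGet?_natCast, List.getElem?_concat_length]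
      rw [hL]
      conv_lhs => rw [regNameLoop]
      rw [if_pos hlen', hget]
      by_cases hx_ : x = '_'
      · simp [hx_]
      · rw [if_neg (by simpa using hx_)]
        rw [regNameLoop_append xs x _ (by omega), ih hx]
        simp [hx_]

theorem string_eq_ofList_toList (s : String) : String.ofList s.toList = s := by
  simp [String.ofList]

-- ===== VERDICT (by name: the statement is the Claim_ definition above) =====
theorem regName_spec : Claim_equal_regName := by
  intro string _
  unfold Spec_regName regName regName_alt
  dsimp only
  rcases eq_or_ne string.toList [] with hnil | hne
  · rw [hnil]
    have hs : string = String.ofList [] := by rw [← hnil, string_eq_ofList_toList]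
    have h1 : regNameLoop ([] : List Char) ((([] : List Char).length : Int) - 1) = -1 := by
      rw [regNameLoop]; norm_num
    rw [h1]
    have h2 : PySem.List.slice ([] : List Char) none (some (-1)) = [] := by decide
    norm_num [PySem.List.enumerate_nil, h2]
    rw [hs]
  · have hlen : 0 < string.toList.length := List.length_pos_iff.mpr hne
    rw [regNameLoop_eq_fold string.toList hne]
    set L := (PySem.List.enumerate string.toList).foldl
      (fun acc ic => if ic.2 = '_' then ic.1 else acc) 0 with hLdef
    have hL0 : 0 ≤ L := by
      rw [hLdef, ← regNameLoop_eq_fold string.toList hne]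
      exact regNameLoop_nonneg _ _ (by omega)
    by_cases hz : L = 0
    · simp [hz]
    · simp [hz, show 0 < L by omega]
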